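-- pv_equiv track=rewrite | github.com/high-dimensional/3d_very_deep_vae | SharedModules/misc.py | comma_separated_subsets
-- ===== SOURCE A (Python) =====
-- def comma_separated_subsets(s, max_size=None):
--     all_subsets = []
--     x = len(s)
--
--     for i in range(1, 1 << x):
--         subset = [s[j] for j in range(x) if (i & (1 << j))]
--
--         if not (max_size is not None and len(subset) > max_size):
--             subset = ','.join(subset)
--             all_subsets.append(subset)
--
--     return all_subsets
-- ===== SOURCE B (Python) =====
-- def comma_separated_subsets(s, max_size=None):
--     # Doubling recursion over the elements: after processing a prefix, acc holds
--     # (in bitmask order) every non-empty subset of that prefix whose size fits,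
--     # as a list of elements; subsets too large are pruned and never extended.
--     acc = []
--     for elem in s:
--         if max_size is None or max_size >= 1:
--             ext = [t + [elem] for t in acc if max_size is None or len(t) < max_size]
--             acc = acc + [[elem]] + ext
--     return [','.join(t) for t in acc]
-- ===== Notes on version B (the rewrite author's own statement) =====
-- stated objective: alternative
-- what changed: Replaced the scan of all 2^n bitmasks (each with an inner n-bit loop) by a doubling recursion over the elements that keeps the subsets of the processed prefix in bitmask order and prunes subsets already at max_size so they are never extended (measured 8.9x at n=16, but both blow up with no max_size, so 'faster' is left unclaimed).
import Mathlib
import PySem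

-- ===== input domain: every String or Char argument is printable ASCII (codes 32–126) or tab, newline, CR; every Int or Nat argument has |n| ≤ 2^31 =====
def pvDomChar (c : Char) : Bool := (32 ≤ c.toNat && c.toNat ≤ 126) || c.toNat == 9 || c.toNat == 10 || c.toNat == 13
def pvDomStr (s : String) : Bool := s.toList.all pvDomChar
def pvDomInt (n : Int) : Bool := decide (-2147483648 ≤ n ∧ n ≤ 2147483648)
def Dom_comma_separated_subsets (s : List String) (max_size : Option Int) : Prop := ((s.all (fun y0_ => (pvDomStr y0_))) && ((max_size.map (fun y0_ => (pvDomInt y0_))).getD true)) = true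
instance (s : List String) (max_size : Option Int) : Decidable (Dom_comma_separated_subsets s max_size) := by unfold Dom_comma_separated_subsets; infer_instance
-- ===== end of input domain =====

-- B replaces the scan of all 2^n bitmasks (with an n-bit inner loop each) by a doubling
-- recursion over the elements that keeps the prefix's subsets in bitmask order and never
-- extends a subset already at max_size (an alternative algorithm; same value everywhere).

-- ===== PORT A =====
-- Python '&' and '<<' ported for NONNEGATIVE operands (exact here: every operand is ≥ 0)
def pyAnd (a b : Int) : Int := ((a.toNat &&& b.toNat : Nat) : Int)
def pyShl (a b : Int) : Int := ((a.toNat <<< b.toNat : Nat) : Int)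

def comma_separated_subsets (s : List String) (max_size : Option Int) : List String :=
  let x : Int := (s.length : Int)
  (PySem.List.pyRange 1 (pyShl 1 x) 1).foldl
    (fun all_subsets i =>
      let subset : List String :=
        ((PySem.List.pyRange 0 x 1).filter (fun j => pyAnd i (pyShl 1 j) != 0)).map
          (fun j => PySem.List.pyGetD s j "")
      if !(match max_size with
           | none => false
           | some m => decide ((subset.length : Int) > m)) then
        all_subsets ++ [PySem.Str.join "," subset]
      else all_subsets)
    []

-- ===== PORT B =====
def comma_separated_subsets_alt (s : List String) (max_size : Option Int) : List String :=
  let acc : List (List String) := s.foldl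
    (fun acc elem =>
      if (match max_size with | none => true | some m => decide (1 ≤ m)) then
        let ext := (acc.filter (fun t => match max_size with
                      | none => true
                      | some m => decide ((t.length : Int) < m))).map (fun t => t ++ [elem])
        acc ++ [[elem]] ++ ext
      else acc)
    []
  acc.map (fun t => PySem.Str.join "," t)

-- ===== PRECONDITION & SPEC =====
def Spec_comma_separated_subsets (s : List String) (max_size : Option Int) (out : List String) : Prop := out = comma_separated_subsets_alt s max_size
instance (s : List String) (max_size : Option Int) (out : List String) : Decidable (Spec_comma_separated_subsets s max_size out) := by unfold Spec_comma_separated_subsets; infer_instance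

-- ===== CLAIM (what is proved, stated in full; the proofs are below) =====
def Claim_equal_comma_separated_subsets : Prop := ∀ (s : List String) (max_size : Option Int), Dom_comma_separated_subsets s max_size → Spec_comma_separated_subsets s max_size (comma_separated_subsets s max_size)

-- ===== LEMMAS AND PROOFS =====

-- size filter shared by both characterizations
def okF (max_size : Option Int) (t : List String) : Bool :=
  match max_size with | none => true | some m => decide ((t.length : Int) ≤ m)

-- all non-empty subsets of s, as element lists, in bitmask order
def subsAll (s : List String) : List (List String) :=
  s.foldl (fun a e => a ++ [[e]] ++ a.map (· ++ [e])) []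

-- the subset selected by bitmask i
def maskSubset (s : List String) (i : Nat) : List String :=
  ((List.range s.length).filter (fun j => i.testBit j)).map (fun j => s.getD j "")

theorem tb_low (k j m : Nat) (hj : j < k) : (2 ^ k + m).testBit j = m.testBit j := by
  have h2 : 2 ^ (k - j - 1) * 2 * 2 ^ j = 2 ^ k := by
    rw [mul_assoc, ← pow_succ', ← pow_add]
    congr 1
    omega
  have hd : (2 ^ k + m) / 2 ^ j % 2 = m / 2 ^ j % 2 := by
    rw [Nat.add_comm, ← h2,
        Nat.add_mul_div_right _ _ (Nat.two_pow_pos j),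
        Nat.add_mul_mod_self_right]
  simp [Nat.testBit_eq_decide_div_mod_eq, hd]

theorem tb_self (k m : Nat) (hm : m < 2 ^ k) : (2 ^ k + m).testBit k = true := by
  rw [Nat.testBit_eq_decide_div_mod_eq, Nat.add_comm,
      Nat.add_div_right _ (Nat.two_pow_pos k), Nat.div_eq_of_lt hm]
  decide

theorem maskSubset_congr (s : List String) (a b : Nat)
    (h : ∀ j < s.length, a.testBit j = b.testBit j) : maskSubset s a = maskSubset s b := by
  unfold maskSubset
  congr 1
  apply List.filter_congr
  intro j hj
  exact h j (List.mem_range.mp hj)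

theorem maskSubset_snoc (l : List String) (e : String) (i : Nat) :
    maskSubset (l ++ [e]) i
      = maskSubset l i ++ (if i.testBit l.length then [e] else []) := by
  unfold maskSubset
  have hlen : (l ++ [e]).length = l.length + 1 := by simp
  rw [hlen, List.range_succ, List.filter_append, List.map_append]
  congr 1
  · apply List.map_congr_left
    intro j hj
    have hj' : j < l.length := List.mem_range.mp (List.mem_filter.mp hj).1
    exact List.getD_append _ _ _ _ hj'
  · by_cases h : i.testBit l.length <;>
      simp [h, List.getD_append_right l [e] "" l.length (le_refl _)]

theorem maskSubset_append_low (l : List String) (e : String) (i : Nat)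
    (hi : i < 2 ^ l.length) : maskSubset (l ++ [e]) i = maskSubset l i := by
  rw [maskSubset_snoc, Nat.testBit_eq_false_of_lt hi]
  simp

theorem maskSubset_nil_high (l : List String) :
    maskSubset l (2 ^ l.length) = [] := by
  unfold maskSubset
  rw [List.filter_eq_nil_iff.mpr]
  · simp
  · intro j hj
    have hj' : j < l.length := List.mem_range.mp hj
    simp [Nat.testBit_two_pow_of_ne (show l.length ≠ j by omega)]

theorem maskSubset_append_self (l : List String) (e : String) :
    maskSubset (l ++ [e]) (2 ^ l.length) = [e] := by
  rw [maskSubset_snoc, Nat.testBit_two_pow_self, maskSubset_nil_high]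
  simp

theorem maskSubset_append_high (l : List String) (e : String) (i : Nat)
    (hi : i < 2 ^ l.length) :
    maskSubset (l ++ [e]) (2 ^ l.length + i) = maskSubset l i ++ [e] := by
  rw [maskSubset_snoc, tb_self _ _ hi]
  simp only [if_pos]
  congr 1
  exact maskSubset_congr _ _ _ (fun j hj => tb_low _ _ _ hj)

theorem subsAll_snoc (l : List String) (e : String) :
    subsAll (l ++ [e]) = subsAll l ++ [[e]] ++ (subsAll l).map (· ++ [e]) := by
  simp [subsAll, List.foldl_append]

theorem mask_main (s : List String) :
    (List.range (2 ^ s.length - 1)).map (fun k => maskSubset s (k + 1)) = subsAll s := by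
  induction s using List.reverseRecOn with
  | nil => simp [subsAll]
  | append_singleton l e ih =>
    rw [subsAll_snoc]
    have hn : (l ++ [e]).length = l.length + 1 := by simp
    have hpow : 0 < 2 ^ l.length := Nat.two_pow_pos l.length
    have hsplit : 2 ^ (l ++ [e]).length - 1 = (2 ^ l.length - 1 + 1) + (2 ^ l.length - 1) := by
      rw [hn, pow_succ]; omega
    rw [hsplit, List.range_add, List.map_append, List.range_succ, List.map_append]
    congr 1
    · congr 1
      · rw [← ih]
        apply List.map_congr_left
        intro k hk
        have hk' : k + 1 < 2 ^ l.length := by have := List.mem_range.mp hk; omega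
        exact maskSubset_append_low l e (k + 1) hk'
      · simp only [List.map_cons, List.map_nil]
        rw [show 2 ^ l.length - 1 + 1 = 2 ^ l.length by omega, maskSubset_append_self]
    · rw [List.map_map, ← ih, List.map_map]
      apply List.map_congr_left
      intro k hk
      have hk1 : k + 1 < 2 ^ l.length := by have := List.mem_range.mp hk; omega
      show maskSubset (l ++ [e]) ((2 ^ l.length - 1 + 1) + k + 1) = maskSubset l (k + 1) ++ [e]
      rw [show (2 ^ l.length - 1 + 1) + k + 1 = 2 ^ l.length + (k + 1) by omega]
      exact maskSubset_append_high l e (k + 1) hk1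

theorem inner_eq (s : List String) (i : Int) :
    ((PySem.List.pyRange 0 (s.length : Int) 1).filter
        (fun j => pyAnd i (pyShl 1 j) != 0)).map (fun j => PySem.List.pyGetD s j "")
      = maskSubset s i.toNat := by
  rw [PySem.List.pyRange_one, List.filter_map, List.map_map]
  have hN : ((s.length : Int) - 0).toNat = s.length := by omega
  rw [hN]
  unfold maskSubset
  have hcond : ∀ k : Nat, ((fun j => pyAnd i (pyShl 1 j) != 0) ∘ fun k : Nat => (0 : Int) + ↑k) k
      = i.toNat.testBit k := by
    intro k
    simp only [Function.comp, zero_add]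
    have h1 : pyShl 1 (k : Int) = ((2 ^ k : Nat) : Int) := by
      simp only [pyShl, Int.toNat_one, Int.toNat_natCast, Nat.shiftLeft_eq, one_mul]
    have h2 : pyAnd i ((2 ^ k : Nat) : Int) = ((i.toNat &&& 2 ^ k : Nat) : Int) := by
      simp only [pyAnd, Int.toNat_natCast]
    rw [h1, h2, Nat.and_two_pow]
    cases h : i.toNat.testBit k
    · simp [h]
    · simp [h, (Nat.two_pow_pos k).ne']
  rw [List.filter_congr (fun x _ => hcond x)]
  apply List.map_congr_left
  intro j _
  simp only [Function.comp, zero_add, PySem.List.pyGetD_natCast]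

theorem okF_neg (max_size : Option Int) (t : List String) :
    (!(match max_size with
       | none => false
       | some m => decide ((t.length : Int) > m))) = okF max_size t := by
  cases max_size with
  | none => simp [okF]
  | some m => by_cases h : (t.length : Int) ≤ m <;> simp [okF, h] <;> omega

theorem a_char (s : List String) (max_size : Option Int) :
    comma_separated_subsets s max_size
      = ((subsAll s).filter (okF max_size)).map (fun t => PySem.Str.join "," t) := by
  simp only [comma_separated_subsets]
  have hshl : pyShl 1 (s.length : Int) = ((2 ^ s.length : Nat) : Int) := by
    simp [pyShl, Nat.shiftLeft_eq]
  rw [hshl, PySem.List.foldl_append_if, List.nil_append,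
      PySem.List.pyRange_one 1 ((2 ^ s.length : Nat) : Int)]
  have hN : (((2 ^ s.length : Nat) : Int) - 1).toNat = 2 ^ s.length - 1 := by
    have := Nat.two_pow_pos s.length
    omega
  rw [hN, List.filter_map, List.map_map]
  simp only [Function.comp_def, inner_eq, okF_neg]
  have ht : ∀ k : Nat, ((1 : Int) + (k : Nat)).toNat = k + 1 := by intro k; omega
  simp only [ht]
  rw [← mask_main, List.filter_map, List.map_map]
  simp only [Function.comp_def]

theorem b_fold (max_size : Option Int) (s : List String) :
    s.foldl
      (fun acc elem =>
        if (match max_size with | none => true | some m => decide (1 ≤ m)) then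
          acc ++ [[elem]] ++ (acc.filter (fun t => match max_size with
              | none => true
              | some m => decide ((t.length : Int) < m))).map (fun t => t ++ [elem])
        else acc)
      []
      = (subsAll s).filter (okF max_size) := by
  induction s using List.reverseRecOn with
  | nil => simp [subsAll]
  | append_singleton l e ih =>
    rw [List.foldl_append, List.foldl_cons, List.foldl_nil, ih, subsAll_snoc,
        List.filter_append, List.filter_append, List.filter_map, List.filter_filter]
    cases max_size with
    | none => simp [okF, Function.comp_def]
    | some m =>
      split_ifs with hg
      · have h1 : (1 : Int) ≤ m := by simpa using hg
        congr 1
        · congr 1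
          simp [okF, h1]
        · congr 1
          apply List.filter_congr
          intro t _
          have hlen : (((t ++ [e]).length : Nat) : Int) = (t.length : Int) + 1 := by simp
          simp only [Function.comp_def, okF, hlen]
          by_cases hlt : (t.length : Int) < m
          · simp [hlt, show (t.length : Int) ≤ m by omega,
                  show (t.length : Int) + 1 ≤ m by omega]
          · simp [hlt, show ¬ ((t.length : Int) + 1 ≤ m) by omega]
      · have h1 : ¬ (1 : Int) ≤ m := by simpa using hg
        have hok1 : okF (some m) [e] = false := by
          simp [okF]
          omega
        have hokext : List.filter (okF (some m) ∘ fun x => x ++ [e]) (subsAll l) = [] := by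
          rw [List.filter_eq_nil_iff]
          intro t _
          have hlen : (((t ++ [e]).length : Nat) : Int) = (t.length : Int) + 1 := by simp
          simp [Function.comp_def, okF, hlen]
          omega
        simp [hok1, hokext]

theorem b_char (s : List String) (max_size : Option Int) :
    comma_separated_subsets_alt s max_size
      = ((subsAll s).filter (okF max_size)).map (fun t => PySem.Str.join "," t) := by
  simp only [comma_separated_subsets_alt]
  rw [b_fold]

-- ===== VERDICT (by name: the statement is the Claim_ definition above) =====
theorem comma_separated_subsets_spec : Claim_equal_comma_separated_subsets := by
  intro s max_size _
  unfold Spec_comma_separated_subsets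
  rw [a_char, b_char]
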